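-- pv_equiv track=rewrite | github.com/FanghanHu/python-notes | practice/shuffle.py | navieShuffle
-- ===== SOURCE A (Python) =====
-- def navieStep(arr, i):
--     "simulate a step in a navie shuffle algorithm, return all possile result"
--     results = []
--     for j in range(len(arr)):
--         copy = arr.copy()
--         swap(copy, i, j)
--         results.append(copy)
--     return results
--
-- def navieShuffle(arr):
--     "return all possible results of a navie shuffle"
--     result = [arr]
--     # iterate through each step
--     for i in range(len(arr)):
--         # use temp to store result of each step
--         temp = []
--         for tempArr in result:
--             temp.extend(navieStep(tempArr, i))
--         # replace results from last step with results from this step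
--         result = temp
--     return result
--
-- def swap(arr, i, j):
--     arr[i], arr[j] = arr[j], arr[i]
-- ===== SOURCE B (Python) =====
-- def navieShuffle(arr):
--     "return all possible results of a navie shuffle"
--     n = len(arr)
--     results = []
--
--     def rec(cur, i):
--         if i == n:
--             results.append(cur)
--             return
--         for j in range(n):
--             copy = cur.copy()
--             copy[i], copy[j] = copy[j], copy[i]
--             rec(copy, i + 1)
--
--     rec(arr, 0)
--     return results
-- ===== Notes on version B (the rewrite author's own statement) =====
-- stated objective: alternative
-- what changed: Replaced A's iterative breadth-first frontier expansion (rebuilding the whole list of partial results at each step) with a recursive depth-first enumeration that accumulates completed outcomes directly.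
import Mathlib
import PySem

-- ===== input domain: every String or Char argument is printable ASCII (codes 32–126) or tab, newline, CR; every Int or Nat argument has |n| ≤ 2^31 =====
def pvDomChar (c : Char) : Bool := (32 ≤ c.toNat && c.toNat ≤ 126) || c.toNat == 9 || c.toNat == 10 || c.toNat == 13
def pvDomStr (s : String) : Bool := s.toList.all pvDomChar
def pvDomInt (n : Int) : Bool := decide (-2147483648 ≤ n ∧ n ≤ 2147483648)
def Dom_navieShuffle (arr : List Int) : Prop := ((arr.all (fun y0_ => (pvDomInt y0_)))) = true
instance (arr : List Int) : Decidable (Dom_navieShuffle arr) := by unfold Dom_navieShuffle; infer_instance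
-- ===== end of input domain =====

-- B replaces A's breadth-first frontier rebuild by a depth-first recursive enumeration (same outputs, same order).
-- ===== PORT A =====
def pySwapA (l : List Int) (i j : Nat) : List Int :=
  (l.set i (l.getD j 0)).set j (l.getD i 0)

def navieStep (arr : List Int) (i : Nat) : List (List Int) :=
  (List.range arr.length).foldl (fun results j => results ++ [pySwapA arr i j]) []

def navieShuffle (arr : List Int) : List (List Int) :=
  (List.range arr.length).foldl
    (fun result i => result.foldl (fun temp tempArr => temp ++ navieStep tempArr i) [])
    [arr]

-- ===== PORT B =====
def pySwapB (l : List Int) (i j : Nat) : List Int :=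
  (l.set i (l.getD j 0)).set j (l.getD i 0)

-- recursion on the number of remaining steps: fuel = n - i
def recB (n : Nat) (cur : List Int) : Nat → List (List Int)
  | 0 => [cur]
  | fuel + 1 =>
    (List.range n).foldl (fun acc j => acc ++ recB n (pySwapB cur (n - (fuel + 1)) j) fuel) []

def navieShuffle_alt (arr : List Int) : List (List Int) :=
  recB arr.length arr arr.length

-- ===== PRECONDITION & SPEC =====
def Spec_navieShuffle (arr : List Int) (out : List (List Int)) : Prop := out = navieShuffle_alt arr
instance (arr : List Int) (out : List (List Int)) : Decidable (Spec_navieShuffle arr out) := by unfold Spec_navieShuffle; infer_instance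

-- ===== CLAIM (what is proved, stated in full; the proofs are below) =====
def Claim_equal_navieShuffle : Prop := ∀ (arr : List Int), Dom_navieShuffle arr → Spec_navieShuffle arr (navieShuffle arr)

-- ===== LEMMAS AND PROOFS =====
theorem foldl_app_eq_flatMap {α β : Type} (L : List α) (g : α → List β) (init : List β) :
    L.foldl (fun acc t => acc ++ g t) init = init ++ L.flatMap g := by
  induction L generalizing init with
  | nil => simp
  | cons x xs ih => simp [List.foldl, ih, List.flatMap_cons]

theorem navieStep_eq_map (arr : List Int) (i : Nat) :
    navieStep arr i = (List.range arr.length).map (fun j => pySwapA arr i j) := by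
  unfold navieStep
  rw [foldl_app_eq_flatMap, List.nil_append]
  induction (List.range arr.length) with
  | nil => rfl
  | cons x xs ih => simp only [List.flatMap_cons, List.map_cons, ih, List.singleton_append]

theorem pySwapA_length (l : List Int) (i j : Nat) : (pySwapA l i j).length = l.length := by
  simp [pySwapA]

theorem recB_eq (n : Nat) (cur : List Int) (fuel : Nat) :
    recB n cur (fuel + 1) =
      (List.range n).flatMap (fun j => recB n (pySwapB cur (n - (fuel + 1)) j) fuel) := by
  rw [recB, foldl_app_eq_flatMap]
  simp

theorem loop_eq (n : Nat) : ∀ (fuel i : Nat), i + fuel = n → ∀ (L : List (List Int)),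
    (∀ t ∈ L, t.length = n) →
    (List.range' i fuel).foldl
      (fun result k => result.foldl (fun temp tempArr => temp ++ navieStep tempArr k) []) L
    = L.flatMap (fun c => recB n c fuel) := by
  intro fuel
  induction fuel with
  | zero => intro i _ L _; simp [recB]
  | succ fuel ih =>
    intro i hi L hL
    rw [List.range'_succ, List.foldl_cons, foldl_app_eq_flatMap]
    have hlen : ∀ t ∈ List.flatMap (fun tempArr => navieStep tempArr i) L, t.length = n := by
      intro t ht
      simp only [List.mem_flatMap] at ht
      obtain ⟨u, hu, ht⟩ := ht
      rw [navieStep_eq_map] at ht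
      simp only [List.mem_map] at ht
      obtain ⟨j, _, rfl⟩ := ht
      rw [pySwapA_length]; exact hL u hu
    rw [List.nil_append, ih (i + 1) (by omega) _ hlen, List.flatMap_assoc]
    apply List.flatMap_congr
    intro c hc
    rw [navieStep_eq_map, List.flatMap_map, recB_eq, hL c hc]
    have : n - (fuel + 1) = i := by omega
    rw [this]
    rfl

theorem navieShuffle_spec' (arr : List Int) : navieShuffle arr = navieShuffle_alt arr := by
  unfold navieShuffle navieShuffle_alt
  rw [List.range_eq_range', loop_eq arr.length arr.length 0 (by omega) [arr]
    (by intro t ht; simp at ht; simp [ht])]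
  simp

-- ===== VERDICT (by name: the statement is the Claim_ definition above) =====
theorem navieShuffle_spec : Claim_equal_navieShuffle := by
  intro arr _
  exact navieShuffle_spec' arr
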